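-- pv_equiv track=rewrite | github.com/farzaa/clicky | windows/main.py | _extract_parse_topic_from_user_text
-- ===== SOURCE A (Python) =====
-- def _extract_parse_topic_from_user_text(user_text: str):
--     normalized_user_text = user_text.strip()
--     normalized_lowercase_user_text = normalized_user_text.lower()
--
--     if normalized_lowercase_user_text in ("parse", "/parse"):
--         return ""
--
--     for parse_command_prefix in ("/parse ", "parse "):
--         if normalized_lowercase_user_text.startswith(parse_command_prefix):
--             return normalized_user_text[len(parse_command_prefix):].strip()
--
--     return None
-- ===== SOURCE B (Python) =====
-- import re
--
-- _PARSE_RE = re.compile(r"/?parse(?: (.*))?", re.IGNORECASE | re.DOTALL)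
--
--
-- def _extract_parse_topic_from_user_text(user_text: str):
--     match = _PARSE_RE.fullmatch(user_text.strip())
--     if match is None:
--         return None
--     topic = match.group(1)
--     return "" if topic is None else topic.strip()
-- ===== Notes on version B (the rewrite author's own statement) =====
-- stated objective: idiomatic
-- what changed: A's membership test against the pair parse//parse plus a loop over the two command prefixes is replaced by one anchored case-insensitive DOTALL regex fullmatch with an optional slash and an optional single-space-plus-capture group on the stripped text; the empty string is returned when the capture group is absent, the stripped capture otherwise.
import Mathlib
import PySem

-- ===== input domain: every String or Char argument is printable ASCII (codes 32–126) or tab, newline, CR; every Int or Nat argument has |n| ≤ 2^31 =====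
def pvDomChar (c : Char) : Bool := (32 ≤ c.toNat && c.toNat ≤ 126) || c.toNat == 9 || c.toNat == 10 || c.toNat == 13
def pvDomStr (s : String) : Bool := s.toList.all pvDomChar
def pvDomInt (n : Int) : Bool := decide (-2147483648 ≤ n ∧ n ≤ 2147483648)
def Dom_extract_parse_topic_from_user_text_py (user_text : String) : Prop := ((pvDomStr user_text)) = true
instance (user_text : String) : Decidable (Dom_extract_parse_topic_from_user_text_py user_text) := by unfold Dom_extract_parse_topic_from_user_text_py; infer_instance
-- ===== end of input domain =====

-- B replaces A's exact-match tuple check and prefix loop by a single regex fullmatch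
-- r"/?parse(?: (.*))?" (IGNORECASE|DOTALL) on the stripped text — more idiomatic, same cost.


-- ===== PORT A =====
-- the for-loop over the two prefixes, with its early return
def pvParsePrefixLoop (normalized lowered : String) : List String → Option String
  | [] => none
  | p :: rest =>
    if PySem.Str.startswith lowered p then
      some (PySem.Str.strip (PySem.Str.slice normalized (some (PySem.Str.len p)) none))
    else pvParsePrefixLoop normalized lowered rest

def extract_parse_topic_from_user_text_py (user_text : String) : Option String :=
  let normalized := PySem.Str.strip user_text
  let lowered := PySem.Str.lower normalized
  if lowered = "parse" ∨ lowered = "/parse" then some ""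
  else pvParsePrefixLoop normalized lowered ["/parse ", "parse "]

-- ===== PORT B =====
-- Source B fullmatches the regex r"/?parse(?: (.*))?" with IGNORECASE|DOTALL.  The matcher is
-- hand-ported, exact for THIS pattern: the optional '/' can be consumed greedily with no
-- backtracking (if '/' was consumed and the rest fails, the no-'/' alternative would need the
-- text to continue with 'p'/'P', but it continues with '/'), 'parse' matches case-insensitively
-- (pattern char = lowered text char), and after it either the string ends (group 1 unset → "")
-- or a literal space is followed by the captured '(.*)' (DOTALL: the whole remainder), which
-- Source B then strips.
def pvCIStripParse : List Char → List Char → Option (List Char)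
  | [], rest => some rest
  | _ :: _, [] => none
  | p :: ps, c :: t => if PySem.Chars.lowerChar c = p then pvCIStripParse ps t else none

def pvPeelSlash (s : List Char) : List Char := if s.head? = some '/' then s.tail else s

def pvRegexTail (rest : List Char) : Option String :=
  match rest with
  | [] => some ""
  | c :: g => if c = ' ' then some (String.ofList (PySem.Chars.strip g)) else none

def extract_parse_topic_from_user_text_py_alt (user_text : String) : Option String :=
  let s := (PySem.Str.strip user_text).toList
  match pvCIStripParse ['p', 'a', 'r', 's', 'e'] (pvPeelSlash s) with
  | none => none
  | some rest => pvRegexTail rest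

-- ===== PRECONDITION & SPEC =====
def Spec_extract_parse_topic_from_user_text_py (user_text : String) (out : Option String) : Prop := out = extract_parse_topic_from_user_text_py_alt user_text
instance (user_text : String) (out : Option String) : Decidable (Spec_extract_parse_topic_from_user_text_py user_text out) := by unfold Spec_extract_parse_topic_from_user_text_py; infer_instance

-- ===== CLAIM (what is proved, stated in full; the proofs are below) =====
def Claim_equal_extract_parse_topic_from_user_text_py : Prop := ∀ (user_text : String), Dom_extract_parse_topic_from_user_text_py user_text → Spec_extract_parse_topic_from_user_text_py user_text (extract_parse_topic_from_user_text_py user_text)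

-- ===== LEMMAS AND PROOFS =====

lemma pvToNat_ofNat_lt (n : Nat) (h : n < 55296) : (Char.ofNat n).toNat = n := by
  rw [Char.ofNat, dif_pos (by left; exact h)]
  simp [Char.ofNatAux, Char.toNat]

-- Python str.lower moves only 'A'–'Z'; for a target below code 97 it is the identity test
lemma pvLowerChar_eq_iff (c d : Char) (hd : d.toNat < 97) (hdu : PySem.Chars.isupper d = false) :
    PySem.Chars.lowerChar c = d ↔ c = d := by
  unfold PySem.Chars.lowerChar
  by_cases hc : PySem.Chars.isupper c = true
  · have hrange : 65 ≤ c.toNat ∧ c.toNat ≤ 90 := by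
      unfold PySem.Chars.isupper at hc
      simp only [Bool.and_eq_true, decide_eq_true_eq] at hc
      exact ⟨hc.1, hc.2⟩
    rw [if_pos hc]
    constructor
    · intro h
      exfalso
      have h1 : (Char.ofNat (c.toNat + 32)).toNat = c.toNat + 32 :=
        pvToNat_ofNat_lt (c.toNat + 32) (by omega)
      have h2 : d.toNat = c.toNat + 32 := by rw [← h, h1]
      omega
    · intro h
      exfalso
      rw [h, hdu] at hc
      exact Bool.false_ne_true hc
  · rw [if_neg hc]

-- the case-insensitive matcher consumes a fixed pattern iff the pattern prefixes the lowered text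
lemma pvCIStripParse_spec (ps cs : List Char) :
    pvCIStripParse ps cs =
      if ps.isPrefixOf (PySem.Chars.lower cs) then some (cs.drop ps.length) else none := by
  induction ps generalizing cs with
  | nil => simp [pvCIStripParse, List.isPrefixOf]
  | cons p ps ih =>
    cases cs with
    | nil => simp [pvCIStripParse, PySem.Chars.lower]
    | cons c t =>
      simp only [pvCIStripParse, PySem.Chars.lower, List.map, List.isPrefixOf]
      by_cases h : PySem.Chars.lowerChar c = p
      · rw [if_pos h, ih]
        simp [PySem.Chars.lower, h]
      · rw [if_neg h]
        have hb : (p == PySem.Chars.lowerChar c) = false := by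
          simp; intro hh; exact h hh.symm
        simp [hb]

lemma pvSliceStrip (n : String) (k : Int) (hk : 0 ≤ k) :
    PySem.Str.strip (PySem.Str.slice n (some k) none) =
      String.ofList (PySem.Chars.strip (n.toList.drop k.toNat)) := by
  apply String.toList_inj.mp
  rw [PySem.Str.toList_strip, PySem.Str.toList_slice, PySem.Chars.slice_eq_listSlice,
      PySem.List.slice_from _ hk, String.toList_ofList]

-- the heart of the equivalence: A's exact-match-or-prefix cascade against B's matcher tail,
-- once the optional leading '/' has been peeled on both sides
lemma pvKeyCore (v : List Char) :
    (if PySem.Chars.lower v = ['p', 'a', 'r', 's', 'e'] then some ""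
     else if List.isPrefixOf ['p', 'a', 'r', 's', 'e', ' '] (PySem.Chars.lower v) then
       some (String.ofList (PySem.Chars.strip (v.drop 6)))
     else none)
    = (if List.isPrefixOf ['p', 'a', 'r', 's', 'e'] (PySem.Chars.lower v) then
         pvRegexTail (v.drop 5)
       else none) := by
  by_cases hp : List.isPrefixOf ['p', 'a', 'r', 's', 'e'] (PySem.Chars.lower v)
  · rw [if_pos hp]
    have hpfx : ['p', 'a', 'r', 's', 'e'] <+: PySem.Chars.lower v := List.isPrefixOf_iff_prefix.mp hp
    have hlen5 : 5 ≤ v.length := by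
      have := hpfx.length_le
      simpa [PySem.Chars.lower] using this
    cases hv5 : v.drop 5 with
    | nil =>
      have hle : v.length ≤ 5 := by
        have := List.drop_eq_nil_iff.mp hv5
        omega
      have heq : PySem.Chars.lower v = ['p', 'a', 'r', 's', 'e'] :=
        (List.IsPrefix.eq_of_length hpfx (by simp [PySem.Chars.lower]; omega)).symm
      rw [if_pos heq]
      simp [pvRegexTail]
    | cons d g =>
      have hsplit : PySem.Chars.lower v =
          ['p', 'a', 'r', 's', 'e'] ++ (PySem.Chars.lowerChar d :: PySem.Chars.lower g) := by
        have h1 : (PySem.Chars.lower v).take 5 = ['p', 'a', 'r', 's', 'e'] := by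
          obtain ⟨r, hr⟩ := hpfx
          rw [← hr]; simp
        have h2 : (PySem.Chars.lower v).drop 5 = PySem.Chars.lowerChar d :: PySem.Chars.lower g := by
          simp [PySem.Chars.lower, ← List.map_drop, hv5]
        rw [← List.take_append_drop 5 (PySem.Chars.lower v), h1, h2]
      have hne : ¬ PySem.Chars.lower v = ['p', 'a', 'r', 's', 'e'] := by
        rw [hsplit]; simp
      rw [if_neg hne]
      have hdrop6 : v.drop 6 = g := by
        have h7 : v.drop 6 = (v.drop 5).drop 1 := by rw [List.drop_drop]
        rw [h7, hv5]; simp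
      have hcond : List.isPrefixOf ['p', 'a', 'r', 's', 'e', ' '] (PySem.Chars.lower v)
          ↔ d = ' ' := by
        rw [List.isPrefixOf_iff_prefix, hsplit]
        constructor
        · intro h
          have h' : [' '] <+: (PySem.Chars.lowerChar d :: PySem.Chars.lower g) :=
            (List.prefix_append_right_inj ['p', 'a', 'r', 's', 'e']).mp (by simpa using h)
          obtain ⟨r, hr⟩ := h'
          have h3 : ' ' = PySem.Chars.lowerChar d := by
            have := congrArg List.head? hr
            simpa using this
          exact (pvLowerChar_eq_iff d ' ' (by decide) (by decide)).mp h3.symm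
        · intro h
          subst h
          exact ⟨PySem.Chars.lower g, by simp [(by decide : PySem.Chars.lowerChar ' ' = ' ')]⟩
      by_cases hd : d = ' '
      · rw [if_pos (hcond.mpr hd), hdrop6]
        simp [pvRegexTail, hd]
      · rw [if_neg (fun h => hd (hcond.mp h))]
        simp [pvRegexTail, hd]
  · rw [if_neg hp]
    have hnp : ¬ (['p', 'a', 'r', 's', 'e'] <+: PySem.Chars.lower v) := fun h =>
      hp (List.isPrefixOf_iff_prefix.mpr h)
    have h1 : ¬ PySem.Chars.lower v = ['p', 'a', 'r', 's', 'e'] := fun h =>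
      hnp (h ▸ List.prefix_refl _)
    have h2 : ¬ List.isPrefixOf ['p', 'a', 'r', 's', 'e', ' '] (PySem.Chars.lower v) := by
      intro h
      exact hnp (List.IsPrefix.trans (by decide) (List.isPrefixOf_iff_prefix.mp h))
    rw [if_neg h1, if_neg h2]


lemma pvSlashCase (t : List Char) :
    (if PySem.Chars.lower ('/' :: t) = ['p', 'a', 'r', 's', 'e'] ∨ PySem.Chars.lower ('/' :: t) = ['/', 'p', 'a', 'r', 's', 'e'] then
       some ""
     else if ['/', 'p', 'a', 'r', 's', 'e', ' '].isPrefixOf (PySem.Chars.lower ('/' :: t)) = true then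
       some (String.ofList (PySem.Chars.strip (List.drop 7 ('/' :: t))))
     else if ['p', 'a', 'r', 's', 'e', ' '].isPrefixOf (PySem.Chars.lower ('/' :: t)) = true then
       some (String.ofList (PySem.Chars.strip (List.drop 6 ('/' :: t))))
     else none)
    = (if List.isPrefixOf ['p', 'a', 'r', 's', 'e'] (PySem.Chars.lower t) then pvRegexTail (t.drop 5)
       else none) := by
  have e1 : PySem.Chars.lower ('/' :: t) = '/' :: PySem.Chars.lower t := by
    unfold PySem.Chars.lower
    rw [List.map_cons, (by decide : PySem.Chars.lowerChar '/' = '/')]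
  rw [e1]
  have c1 : ('/' :: PySem.Chars.lower t = ['p', 'a', 'r', 's', 'e']) ↔ False := by simp
  have c2 : ('/' :: PySem.Chars.lower t = ['/', 'p', 'a', 'r', 's', 'e']) ↔
      PySem.Chars.lower t = ['p', 'a', 'r', 's', 'e'] := by simp
  have c3 : (['/', 'p', 'a', 'r', 's', 'e', ' '].isPrefixOf ('/' :: PySem.Chars.lower t)) =
      ['p', 'a', 'r', 's', 'e', ' '].isPrefixOf (PySem.Chars.lower t) := by
    simp [List.isPrefixOf]
  have c4 : (['p', 'a', 'r', 's', 'e', ' '].isPrefixOf ('/' :: PySem.Chars.lower t)) = false := by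
    simp [List.isPrefixOf]
  simp only [c1, c2, false_or, c3, c4, Bool.false_eq_true, if_false]
  exact pvKeyCore t

lemma pvNoSlashCase (c : Char) (t : List Char) (hc : c ≠ '/') :
    (if PySem.Chars.lower (c :: t) = ['p', 'a', 'r', 's', 'e'] ∨ PySem.Chars.lower (c :: t) = ['/', 'p', 'a', 'r', 's', 'e'] then
       some ""
     else if ['/', 'p', 'a', 'r', 's', 'e', ' '].isPrefixOf (PySem.Chars.lower (c :: t)) = true then
       some (String.ofList (PySem.Chars.strip (List.drop 7 (c :: t))))
     else if ['p', 'a', 'r', 's', 'e', ' '].isPrefixOf (PySem.Chars.lower (c :: t)) = true then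
       some (String.ofList (PySem.Chars.strip (List.drop 6 (c :: t))))
     else none)
    = (if List.isPrefixOf ['p', 'a', 'r', 's', 'e'] (PySem.Chars.lower (c :: t)) then
         pvRegexTail ((c :: t).drop 5)
       else none) := by
  have e1 : PySem.Chars.lower (c :: t) = PySem.Chars.lowerChar c :: PySem.Chars.lower t := by
    unfold PySem.Chars.lower
    rw [List.map_cons]
  have hlc : PySem.Chars.lowerChar c ≠ '/' := fun h =>
    hc ((pvLowerChar_eq_iff c '/' (by decide) (by decide)).mp h)
  have hbeq : ('/' == PySem.Chars.lowerChar c) = false := beq_eq_false_iff_ne.mpr (Ne.symm hlc)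

  have c2 : (PySem.Chars.lower (c :: t) = ['/', 'p', 'a', 'r', 's', 'e']) ↔ False := by
    rw [e1]; simp [hlc]
  have c3 : (['/', 'p', 'a', 'r', 's', 'e', ' '].isPrefixOf (PySem.Chars.lower (c :: t))) = false := by
    rw [e1]; simp [List.isPrefixOf, hbeq]
  simp only [c2, or_false, c3, Bool.false_eq_true, if_false]
  exact pvKeyCore (c :: t)

-- ===== VERDICT (by name: the statement is the Claim_ definition above) =====
theorem extract_parse_topic_from_user_text_py_spec : Claim_equal_extract_parse_topic_from_user_text_py := by
  intro u _
  show extract_parse_topic_from_user_text_py u = extract_parse_topic_from_user_text_py_alt u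
  unfold extract_parse_topic_from_user_text_py extract_parse_topic_from_user_text_py_alt
  dsimp only
  rw [pvCIStripParse_spec]
  simp only [pvParsePrefixLoop]
  rw [pvSliceStrip _ (PySem.Str.len "/parse ") (by decide),
      pvSliceStrip _ (PySem.Str.len "parse ") (by decide)]
  generalize PySem.Str.strip u = n
  simp only [← String.toList_inj, PySem.Str.toList_lower, PySem.Str.startswith_eq,
    PySem.Chars.startswith,
    (by decide : "parse".toList = ['p', 'a', 'r', 's', 'e']),
    (by decide : "/parse".toList = ['/', 'p', 'a', 'r', 's', 'e']),
    (by decide : "/parse ".toList = ['/', 'p', 'a', 'r', 's', 'e', ' ']),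
    (by decide : "parse ".toList = ['p', 'a', 'r', 's', 'e', ' ']),
    (by decide : (PySem.Str.len "/parse ").toNat = 7),
    (by decide : (PySem.Str.len "parse ").toNat = 6)]
  generalize n.toList = cs
  rcases cs with _ | ⟨c, t⟩
  · simp [pvPeelSlash, PySem.Chars.lower]
  · by_cases hc : c = '/'
    · subst hc
      rw [show pvPeelSlash ('/' :: t) = t from by simp [pvPeelSlash], pvSlashCase t]
      by_cases hb : List.isPrefixOf ['p', 'a', 'r', 's', 'e'] (PySem.Chars.lower t) = true
      · rw [if_pos hb, if_pos hb]
        rfl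
      · rw [if_neg hb, if_neg hb]
    · rw [show pvPeelSlash (c :: t) = c :: t from by simp [pvPeelSlash, hc], pvNoSlashCase c t hc]
      by_cases hb : List.isPrefixOf ['p', 'a', 'r', 's', 'e'] (PySem.Chars.lower (c :: t)) = true
      · rw [if_pos hb, if_pos hb]
        rfl
      · rw [if_neg hb, if_neg hb]
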